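-- pv_equiv track=rewrite | github.com/claudlos/Kryptos | strategy31_hill_cipher.py | solve_hill2
-- ===== SOURCE A (Python) =====
-- def mod_inv(a: int, m: int = 26) -> int | None:
--     """Modular inverse of a mod m, or None if not invertible."""
--     for x in range(m):
--         if (a * x) % m == 1:
--             return x
--     return None
--
-- def solve_hill2(pairs: list[tuple[int, int, int, int]]) -> list[list[int]] | None:
--     """Given known (c0, c1, p0, p1) pairs, solve for the 2x2 key matrix.
--
--     Hill encryption: [c0, c1] = K * [p0, p1] mod 26
--     So K_inv * [c0, c1] = [p0, p1]
--     We solve for K_inv directly from known (cipher, plain) pairs.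
--
--     Need 2 linearly independent pairs to solve uniquely.
--     """
--     if len(pairs) < 2:
--         return None
--
--     # Try all pairs of 2 equations
--     for i in range(len(pairs)):
--         for j in range(i+1, len(pairs)):
--             c0a, c1a, p0a, p1a = pairs[i]
--             c0b, c1b, p0b, p1b = pairs[j]
--
--             # System: K_inv * [[c0a, c0b], [c1a, c1b]] = [[p0a, p0b], [p1a, p1b]]
--             # C_mat = [[c0a, c0b], [c1a, c1b]]
--             # P_mat = [[p0a, p0b], [p1a, p1b]]
--             # K_inv = P_mat * C_mat^(-1)
--
--             det_C = (c0a * c1b - c0b * c1a) % 26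
--             di = mod_inv(det_C, 26)
--             if di is None:
--                 continue
--
--             C_inv = [
--                 [(c1b * di) % 26, ((-c0b) * di) % 26],
--                 [((-c1a) * di) % 26, (c0a * di) % 26],
--             ]
--
--             # K_inv = P_mat * C_inv
--             K_inv = [[0, 0], [0, 0]]
--             P_mat = [[p0a, p0b], [p1a, p1b]]
--             for r in range(2):
--                 for c in range(2):
--                     K_inv[r][c] = (P_mat[r][0] * C_inv[0][c] + P_mat[r][1] * C_inv[1][c]) % 26
--
--             # Verify against ALL pairs
--             all_match = True
--             for c0, c1, p0, p1 in pairs: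
--                 dp0 = (K_inv[0][0] * c0 + K_inv[0][1] * c1) % 26
--                 dp1 = (K_inv[1][0] * c0 + K_inv[1][1] * c1) % 26
--                 if dp0 != p0 or dp1 != p1:
--                     all_match = False
--                     break
--
--             if all_match:
--                 return K_inv
--
--     return None
-- ===== SOURCE B (Python) =====
-- # Faster: scan once for the FIRST cipher-pair with invertible determinant mod 26,
-- # solve K_inv from it in closed form via a fixed inverse table, verify all pairs once.
-- # Any K_inv that verifies every pair is uniquely determined by any invertible pair,
-- # so stopping at the first invertible pair is exact.
--
-- _INV26 = {1: 1, 3: 9, 5: 21, 7: 15, 9: 3, 11: 19, 15: 7, 17: 23, 19: 11, 21: 5, 23: 17, 25: 25}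
--
-- def solve_hill2(pairs):
--     if len(pairs) < 2:
--         return None
--     n = len(pairs)
--     for i in range(n):
--         c0a, c1a, p0a, p1a = pairs[i]
--         for j in range(i + 1, n):
--             c0b, c1b, p0b, p1b = pairs[j]
--             det = (c0a * c1b - c0b * c1a) % 26
--             di = _INV26.get(det)
--             if di is None:
--                 continue
--             # closed-form K_inv = P * adj(C) * di  (first invertible pair decides)
--             k00 = (p0a * c1b - p0b * c1a) * di % 26
--             k01 = (p0b * c0a - p0a * c0b) * di % 26
--             k10 = (p1a * c1b - p1b * c1a) * di % 26
--             k11 = (p1b * c0a - p1a * c0b) * di % 26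
--             ok = all((k00 * c0 + k01 * c1) % 26 == p0 and (k10 * c0 + k11 * c1) % 26 == p1
--                      for c0, c1, p0, p1 in pairs)
--             return [[k00, k01], [k10, k11]] if ok else None
--     return None
-- ===== Notes on version B (the rewrite author's own statement) =====
-- stated objective: faster
-- what changed: Instead of trying every (i,j) pair of equations and re-verifying all pairs for each candidate key, B stops at the FIRST pair with invertible cipher determinant, solves K_inv once in closed form (fixed mod-26 inverse table instead of a 26-step search, direct adjugate formula instead of building C_inv and a 2x2 matrix-product loop) and verifies all pairs once; any key verifying all pairs is uniquely determined by any invertible pair, so this is exact.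
import Mathlib
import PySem

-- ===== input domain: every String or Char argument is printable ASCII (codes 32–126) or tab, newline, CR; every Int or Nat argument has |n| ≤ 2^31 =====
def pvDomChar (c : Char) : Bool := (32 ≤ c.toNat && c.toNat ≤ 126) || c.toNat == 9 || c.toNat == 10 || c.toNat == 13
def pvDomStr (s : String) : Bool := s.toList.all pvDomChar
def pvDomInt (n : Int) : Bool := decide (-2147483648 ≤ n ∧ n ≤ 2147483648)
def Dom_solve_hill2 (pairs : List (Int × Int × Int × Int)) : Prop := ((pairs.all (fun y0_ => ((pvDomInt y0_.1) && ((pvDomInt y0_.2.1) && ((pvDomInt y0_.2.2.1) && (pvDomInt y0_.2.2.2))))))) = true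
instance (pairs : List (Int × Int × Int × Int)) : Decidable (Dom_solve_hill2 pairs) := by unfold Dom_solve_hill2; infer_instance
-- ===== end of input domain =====

-- B stops at the first invertible cipher pair, solves K_inv once in closed form
-- (fixed inverse table, adjugate formula) and verifies once; A tries every pair of
-- equations — the return values agree on every input (A and B are both total).


-- ===== PORT A =====
-- mod_inv: linear search for the modular inverse, as in A
def mod_inv (a : Int) (m : Int) : Option Int :=
  (PySem.List.pyRange 0 m 1).find? (fun x => PySem.Int.mod (a * x) m == 1)

-- A's verification loop over all pairs (early exit on mismatch)
def verifyA (k00 k01 k10 k11 : Int) : List (Int × Int × Int × Int) → Bool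
  | [] => true
  | (c0, c1, p0, p1) :: rest =>
    let dp0 := PySem.Int.mod (k00 * c0 + k01 * c1) 26
    let dp1 := PySem.Int.mod (k10 * c0 + k11 * c1) 26
    if dp0 != p0 || dp1 != p1 then false else verifyA k00 k01 k10 k11 rest

-- body of A's inner loop for one (i,j) combination
def tryPairA (pa pb : Int × Int × Int × Int) (pairs : List (Int × Int × Int × Int)) :
    Option (List (List Int)) :=
  let (c0a, c1a, p0a, p1a) := pa
  let (c0b, c1b, p0b, p1b) := pb
  let det_C := PySem.Int.mod (c0a * c1b - c0b * c1a) 26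
  match mod_inv det_C 26 with
  | none => none
  | some di =>
    -- C_inv entries
    let ci00 := PySem.Int.mod (c1b * di) 26
    let ci01 := PySem.Int.mod ((-c0b) * di) 26
    let ci10 := PySem.Int.mod ((-c1a) * di) 26
    let ci11 := PySem.Int.mod (c0a * di) 26
    -- K_inv = P_mat * C_inv: the r,c ∈ {0,1} product loop, unrolled
    let k00 := PySem.Int.mod (p0a * ci00 + p0b * ci10) 26
    let k01 := PySem.Int.mod (p0a * ci01 + p0b * ci11) 26
    let k10 := PySem.Int.mod (p1a * ci00 + p1b * ci10) 26
    let k11 := PySem.Int.mod (p1a * ci01 + p1b * ci11) 26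
    if verifyA k00 k01 k10 k11 pairs then some [[k00, k01], [k10, k11]] else none

-- for j in range(i+1, n): pb runs over the tail after pa
def innerA (pa : Int × Int × Int × Int) :
    List (Int × Int × Int × Int) → List (Int × Int × Int × Int) → Option (List (List Int))
  | [], _ => none
  | pb :: rest, pairs =>
    match tryPairA pa pb pairs with
    | some k => some k
    | none => innerA pa rest pairs

-- for i in range(n): pa runs over the list, inner loop over the remaining tail
def outerA : List (Int × Int × Int × Int) → List (Int × Int × Int × Int) → Option (List (List Int))
  | [], _ => none
  | pa :: rest, pairs =>
    match innerA pa rest pairs with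
    | some k => some k
    | none => outerA rest pairs

def solve_hill2 (pairs : List (Int × Int × Int × Int)) : Option (List (List Int)) :=
  if PySem.List.len pairs < 2 then none else outerA pairs pairs

-- ===== PORT B =====
-- fixed table of inverses mod 26 (B's _INV26 dict, .get = Dict.get?)
def inv26 (d : Int) : Option Int :=
  PySem.Dict.get? (PySem.Dict.ofList
    [(1, 1), (3, 9), (5, 21), (7, 15), (9, 3), (11, 19),
     (15, 7), (17, 23), (19, 11), (21, 5), (23, 17), (25, 25)]) d

-- B's one-shot verification: all(...)
def verifyB (k00 k01 k10 k11 : Int) (pairs : List (Int × Int × Int × Int)) : Bool :=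
  pairs.all (fun q =>
    (PySem.Int.mod (k00 * q.1 + k01 * q.2.1) 26 == q.2.2.1) &&
    (PySem.Int.mod (k10 * q.1 + k11 * q.2.1) 26 == q.2.2.2))

-- B's inner loop: `some r` models B's early `return r` at the first invertible pair
def innerB (pa : Int × Int × Int × Int) :
    List (Int × Int × Int × Int) → List (Int × Int × Int × Int) →
    Option (Option (List (List Int)))
  | [], _ => none
  | pb :: rest, pairs =>
    let (c0a, c1a, p0a, p1a) := pa
    let (c0b, c1b, p0b, p1b) := pb
    let det := PySem.Int.mod (c0a * c1b - c0b * c1a) 26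
    match inv26 det with
    | none => innerB pa rest pairs
    | some di =>
      -- closed-form K_inv = P * adj(C) * di
      let k00 := PySem.Int.mod ((p0a * c1b - p0b * c1a) * di) 26
      let k01 := PySem.Int.mod ((p0b * c0a - p0a * c0b) * di) 26
      let k10 := PySem.Int.mod ((p1a * c1b - p1b * c1a) * di) 26
      let k11 := PySem.Int.mod ((p1b * c0a - p1a * c0b) * di) 26
      some (if verifyB k00 k01 k10 k11 pairs then some [[k00, k01], [k10, k11]] else none)

def outerB : List (Int × Int × Int × Int) → List (Int × Int × Int × Int) →
    Option (Option (List (List Int)))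
  | [], _ => none
  | pa :: rest, pairs =>
    match innerB pa rest pairs with
    | some r => some r
    | none => outerB rest pairs

def solve_hill2_alt (pairs : List (Int × Int × Int × Int)) : Option (List (List Int)) :=
  if PySem.List.len pairs < 2 then none
  else
    match outerB pairs pairs with
    | some r => r
    | none => none

-- ===== PRECONDITION & SPEC =====
def Spec_solve_hill2 (pairs : List (Int × Int × Int × Int)) (out : Option (List (List Int))) : Prop := out = solve_hill2_alt pairs
instance (pairs : List (Int × Int × Int × Int)) (out : Option (List (List Int))) : Decidable (Spec_solve_hill2 pairs out) := by unfold Spec_solve_hill2; infer_instance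

-- ===== CLAIM (what is proved, stated in full; the proofs are below) =====
def Claim_equal_solve_hill2 : Prop := ∀ (pairs : List (Int × Int × Int × Int)), Dom_solve_hill2 pairs → Spec_solve_hill2 pairs (solve_hill2 pairs)

-- ===== LEMMAS AND PROOFS =====

theorem mod26_eq (a : Int) : PySem.Int.mod a 26 = a % 26 :=
  PySem.Int.mod_eq_emod_of_pos (by norm_num)

-- A's searched inverse agrees with B's table on all reduced determinants
theorem mod_inv_eq_inv26 (d : Int) (h0 : 0 ≤ d) (h1 : d < 26) : mod_inv d 26 = inv26 d := by
  interval_cases d <;> decide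

theorem mod_inv_mul (d di : Int) (h : mod_inv d 26 = some di) : d * di % 26 = 1 := by
  have hp := List.find?_some h
  simpa [mod26_eq, beq_iff_eq] using hp

-- congruence transport: A's entry (via reduced C_inv entries) equals the direct formula
theorem mixmod (p q u v : Int) : (p * (u % 26) + q * (v % 26)) % 26 = (p * u + q * v) % 26 := by
  have h : (p * (u % 26) + q * (v % 26)) ≡ p * u + q * v [ZMOD 26] :=
    Int.ModEq.add (Int.ModEq.mul_left p (Int.emod_emod_of_dvd u (dvd_refl 26)))
      (Int.ModEq.mul_left q (Int.emod_emod_of_dvd v (dvd_refl 26)))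
  exact h

-- uniqueness core: a reduced entry satisfying both linear congruences equals the closed form
theorem entry_eq (D di x y α β k : Int)
    (hD : x * α - y * β = k * D)
    (hdi : D % 26 * di % 26 = 1)
    (hk0 : 0 ≤ k) (hk1 : k < 26) :
    (x % 26 * α - y % 26 * β) * di % 26 = k := by
  have h1 : (x % 26 * α - y % 26 * β) * di ≡ (x * α - y * β) * di [ZMOD 26] :=
    Int.ModEq.mul_right di
      (Int.ModEq.sub (Int.ModEq.mul_right α (Int.emod_emod_of_dvd x (dvd_refl 26)))
        (Int.ModEq.mul_right β (Int.emod_emod_of_dvd y (dvd_refl 26))))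
  have h2 : (x * α - y * β) * di = k * (D * di) := by rw [hD]; ring
  have h3 : k * (D * di) ≡ k * (D % 26 * di % 26) [ZMOD 26] :=
    Int.ModEq.mul_left k
      (Int.ModEq.trans
        (Int.ModEq.mul_right di (Int.emod_emod_of_dvd D (dvd_refl 26)).symm)
        (Int.emod_emod_of_dvd (D % 26 * di) (dvd_refl 26)).symm)
  have h4 : (x % 26 * α - y % 26 * β) * di ≡ k [ZMOD 26] := by
    calc (x % 26 * α - y % 26 * β) * di ≡ (x * α - y * β) * di [ZMOD 26] := h1
      _ = k * (D * di) := h2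
      _ ≡ k * (D % 26 * di % 26) [ZMOD 26] := h3
      _ = k := by rw [hdi]; ring
  have : (x % 26 * α - y % 26 * β) * di % 26 = k % 26 := h4
  rwa [Int.emod_eq_of_lt hk0 hk1] at this

theorem verifyA_eq_verifyB (k00 k01 k10 k11 : Int) (l : List (Int × Int × Int × Int)) :
    verifyA k00 k01 k10 k11 l = verifyB k00 k01 k10 k11 l := by
  induction l with
  | nil => rfl
  | cons q rest ih =>
    obtain ⟨c0, c1, p0, p1⟩ := q
    simp only [verifyA, verifyB, List.all_cons, mod26_eq]
    by_cases h0 : (k00 * c0 + k01 * c1) % 26 = p0 <;>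
      by_cases h1 : (k10 * c0 + k11 * c1) % 26 = p1 <;>
        simp [h0, h1, ih, verifyB]

theorem verifyB_mem (k00 k01 k10 k11 : Int) (pairs : List (Int × Int × Int × Int))
    (h : verifyB k00 k01 k10 k11 pairs = true) (q : Int × Int × Int × Int) (hq : q ∈ pairs) :
    (k00 * q.1 + k01 * q.2.1) % 26 = q.2.2.1 ∧ (k10 * q.1 + k11 * q.2.1) % 26 = q.2.2.2 := by
  have := List.all_eq_true.mp h q hq
  simpa [mod26_eq, beq_iff_eq] using this

-- any key with reduced entries that verifies an invertible pair equals the closed-form solution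
theorem key_unique (c0a c1a p0a p1a c0b c1b p0b p1b di k00 k01 k10 k11 : Int)
    (hdi : (c0a * c1b - c0b * c1a) % 26 * di % 26 = 1)
    (hr : 0 ≤ k00 ∧ k00 < 26 ∧ 0 ≤ k01 ∧ k01 < 26 ∧ 0 ≤ k10 ∧ k10 < 26 ∧ 0 ≤ k11 ∧ k11 < 26)
    (va0 : (k00 * c0a + k01 * c1a) % 26 = p0a) (va1 : (k10 * c0a + k11 * c1a) % 26 = p1a)
    (vb0 : (k00 * c0b + k01 * c1b) % 26 = p0b) (vb1 : (k10 * c0b + k11 * c1b) % 26 = p1b) :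
    k00 = (p0a * c1b - p0b * c1a) * di % 26 ∧ k01 = (p0b * c0a - p0a * c0b) * di % 26 ∧
    k10 = (p1a * c1b - p1b * c1a) * di % 26 ∧ k11 = (p1b * c0a - p1a * c0b) * di % 26 := by
  obtain ⟨h00, h00', h01, h01', h10, h10', h11, h11'⟩ := hr
  subst va0 va1 vb0 vb1
  refine ⟨?_, ?_, ?_, ?_⟩
  · exact (entry_eq (c0a * c1b - c0b * c1a) di (k00 * c0a + k01 * c1a) (k00 * c0b + k01 * c1b)
      c1b c1a k00 (by ring) hdi h00 h00').symm
  · exact (entry_eq (c0a * c1b - c0b * c1a) di (k00 * c0b + k01 * c1b) (k00 * c0a + k01 * c1a)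
      c0a c0b k01 (by ring) hdi h01 h01').symm
  · exact (entry_eq (c0a * c1b - c0b * c1a) di (k10 * c0a + k11 * c1a) (k10 * c0b + k11 * c1b)
      c1b c1a k10 (by ring) hdi h10 h10').symm
  · exact (entry_eq (c0a * c1b - c0b * c1a) di (k10 * c0b + k11 * c1b) (k10 * c0a + k11 * c1a)
      c0a c0b k11 (by ring) hdi h11 h11').symm

-- A's K entries (built through C_inv) equal B's closed-form entries
theorem tryPairA_eq (pa pb : Int × Int × Int × Int) (pairs : List (Int × Int × Int × Int))
    (di : Int)
    (h : mod_inv (PySem.Int.mod (pa.1 * pb.2.1 - pb.1 * pa.2.1) 26) 26 = some di) :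
    tryPairA pa pb pairs =
      (if verifyB ((pa.2.2.1 * pb.2.1 - pb.2.2.1 * pa.2.1) * di % 26)
          ((pb.2.2.1 * pa.1 - pa.2.2.1 * pb.1) * di % 26)
          ((pa.2.2.2 * pb.2.1 - pb.2.2.2 * pa.2.1) * di % 26)
          ((pb.2.2.2 * pa.1 - pa.2.2.2 * pb.1) * di % 26) pairs then
        some [[(pa.2.2.1 * pb.2.1 - pb.2.2.1 * pa.2.1) * di % 26,
               (pb.2.2.1 * pa.1 - pa.2.2.1 * pb.1) * di % 26],
              [(pa.2.2.2 * pb.2.1 - pb.2.2.2 * pa.2.1) * di % 26,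
               (pb.2.2.2 * pa.1 - pa.2.2.2 * pb.1) * di % 26]]
      else none) := by
  obtain ⟨c0a, c1a, p0a, p1a⟩ := pa
  obtain ⟨c0b, c1b, p0b, p1b⟩ := pb
  simp only [tryPairA] at *
  rw [h]
  dsimp only
  have e00 : PySem.Int.mod (p0a * (PySem.Int.mod (c1b * di) 26) + p0b * (PySem.Int.mod ((-c1a) * di) 26)) 26
      = (p0a * c1b - p0b * c1a) * di % 26 := by
    rw [mod26_eq, mod26_eq, mod26_eq, mixmod]; congr 1; ring
  have e01 : PySem.Int.mod (p0a * (PySem.Int.mod ((-c0b) * di) 26) + p0b * (PySem.Int.mod (c0a * di) 26)) 26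
      = (p0b * c0a - p0a * c0b) * di % 26 := by
    rw [mod26_eq, mod26_eq, mod26_eq, mixmod]; congr 1; ring
  have e10 : PySem.Int.mod (p1a * (PySem.Int.mod (c1b * di) 26) + p1b * (PySem.Int.mod ((-c1a) * di) 26)) 26
      = (p1a * c1b - p1b * c1a) * di % 26 := by
    rw [mod26_eq, mod26_eq, mod26_eq, mixmod]; congr 1; ring
  have e11 : PySem.Int.mod (p1a * (PySem.Int.mod ((-c0b) * di) 26) + p1b * (PySem.Int.mod (c0a * di) 26)) 26
      = (p1b * c0a - p1a * c0b) * di % 26 := by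
    rw [mod26_eq, mod26_eq, mod26_eq, mixmod]; congr 1; ring
  rw [e00, e01, e10, e11, verifyA_eq_verifyB]

-- master: if the first invertible pair's key fails verification, NO combination can succeed
theorem all_tryPairA_none (pa pb : Int × Int × Int × Int) (pairs : List (Int × Int × Int × Int))
    (di : Int) (hpa : pa ∈ pairs) (hpb : pb ∈ pairs)
    (hdi : mod_inv (PySem.Int.mod (pa.1 * pb.2.1 - pb.1 * pa.2.1) 26) 26 = some di)
    (hfail : verifyB ((pa.2.2.1 * pb.2.1 - pb.2.2.1 * pa.2.1) * di % 26)
        ((pb.2.2.1 * pa.1 - pa.2.2.1 * pb.1) * di % 26)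
        ((pa.2.2.2 * pb.2.1 - pb.2.2.2 * pa.2.1) * di % 26)
        ((pb.2.2.2 * pa.1 - pa.2.2.2 * pb.1) * di % 26) pairs = false) :
    ∀ pa' pb', tryPairA pa' pb' pairs = none := by
  intro pa' pb'
  obtain ⟨c0a', c1a', p0a', p1a'⟩ := pa'
  obtain ⟨c0b', c1b', p0b', p1b'⟩ := pb'
  simp only [tryPairA]
  cases h' : mod_inv (PySem.Int.mod (c0a' * c1b' - c0b' * c1a') 26) 26 with
  | none => rfl
  | some di' =>
    simp only
    rw [verifyA_eq_verifyB]
    set k00 := PySem.Int.mod (p0a' * PySem.Int.mod (c1b' * di') 26 + p0b' * PySem.Int.mod (-c1a' * di') 26) 26 with hk00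
    set k01 := PySem.Int.mod (p0a' * PySem.Int.mod (-c0b' * di') 26 + p0b' * PySem.Int.mod (c0a' * di') 26) 26 with hk01
    set k10 := PySem.Int.mod (p1a' * PySem.Int.mod (c1b' * di') 26 + p1b' * PySem.Int.mod (-c1a' * di') 26) 26 with hk10
    set k11 := PySem.Int.mod (p1a' * PySem.Int.mod (-c0b' * di') 26 + p1b' * PySem.Int.mod (c0a' * di') 26) 26 with hk11
    cases hv : verifyB k00 k01 k10 k11 pairs with
    | false => simp
    | true =>
      exfalso
      -- the verified key equals B's closed-form key for (pa, pb); but that one fails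
      have hda : PySem.Int.mod (pa.1 * pb.2.1 - pb.1 * pa.2.1) 26 * di % 26 = 1 := by
        have := mod_inv_mul _ _ hdi; exact this
      have hdi' : (pa.1 * pb.2.1 - pb.1 * pa.2.1) % 26 * di % 26 = 1 := by
        rwa [mod26_eq] at hda
      have hrange : 0 ≤ k00 ∧ k00 < 26 ∧ 0 ≤ k01 ∧ k01 < 26 ∧ 0 ≤ k10 ∧ k10 < 26 ∧ 0 ≤ k11 ∧ k11 < 26 := by
        refine ⟨?_, ?_, ?_, ?_, ?_, ?_, ?_, ?_⟩ <;>
          simp only [hk00, hk01, hk10, hk11, mod26_eq] <;>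
          first
            | exact Int.emod_nonneg _ (by norm_num)
            | exact Int.emod_lt_of_pos _ (by norm_num)
      have ha := verifyB_mem k00 k01 k10 k11 pairs hv pa hpa
      have hb := verifyB_mem k00 k01 k10 k11 pairs hv pb hpb
      have huniq := key_unique pa.1 pa.2.1 pa.2.2.1 pa.2.2.2 pb.1 pb.2.1 pb.2.2.1 pb.2.2.2 di
        k00 k01 k10 k11 hdi' hrange ha.1 ha.2 hb.1 hb.2
      rw [huniq.1, huniq.2.1, huniq.2.2.1, huniq.2.2.2] at hv
      rw [hv] at hfail
      simp at hfail

-- if every combination fails, A's loops return none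
theorem innerA_none_of_all (pa : Int × Int × Int × Int) (l pairs : List (Int × Int × Int × Int))
    (h : ∀ pa' pb', tryPairA pa' pb' pairs = none) : innerA pa l pairs = none := by
  induction l with
  | nil => rfl
  | cons pb rest ih => simp only [innerA, h pa pb, ih]

theorem outerA_none_of_all (l pairs : List (Int × Int × Int × Int))
    (h : ∀ pa' pb', tryPairA pa' pb' pairs = none) : outerA l pairs = none := by
  induction l with
  | nil => rfl
  | cons pa rest ih => simp only [outerA, innerA_none_of_all pa rest pairs h, ih]

-- det bounds, to bridge mod_inv with the table
theorem det_bounds (x : Int) : 0 ≤ PySem.Int.mod x 26 ∧ PySem.Int.mod x 26 < 26 := by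
  rw [mod26_eq]
  exact ⟨Int.emod_nonneg _ (by norm_num), Int.emod_lt_of_pos _ (by norm_num)⟩

-- when B's inner scan finds nothing invertible, A's inner scan returns none too
theorem innerA_of_innerB_none (pa : Int × Int × Int × Int)
    (l pairs : List (Int × Int × Int × Int)) (h : innerB pa l pairs = none) :
    innerA pa l pairs = none := by
  induction l with
  | nil => rfl
  | cons pb rest ih =>
    obtain ⟨c0a, c1a, p0a, p1a⟩ := pa
    obtain ⟨c0b, c1b, p0b, p1b⟩ := pb
    simp only [innerB] at h
    simp only [innerA, tryPairA]
    rw [mod_inv_eq_inv26 _ (det_bounds _).1 (det_bounds _).2]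
    cases hinv : inv26 (PySem.Int.mod (c0a * c1b - c0b * c1a) 26) with
    | none => rw [hinv] at h; exact ih h
    | some di => rw [hinv] at h; simp at h

-- main correspondence for the inner scans
theorem inner_case (pa : Int × Int × Int × Int) (l pairs : List (Int × Int × Int × Int))
    (r : Option (List (List Int))) (hpa : pa ∈ pairs) (hl : ∀ x ∈ l, x ∈ pairs)
    (h : innerB pa l pairs = some r) :
    (∀ K, r = some K → innerA pa l pairs = some K) ∧
    (r = none → ∀ pa' pb', tryPairA pa' pb' pairs = none) := by
  induction l with
  | nil => simp [innerB] at h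
  | cons pb rest ih =>
    have hpb : pb ∈ pairs := hl pb (by simp)
    have hrest : ∀ x ∈ rest, x ∈ pairs := fun x hx => hl x (by simp [hx])
    simp only [innerB] at h
    cases hinv : inv26 (PySem.Int.mod (pa.1 * pb.2.1 - pb.1 * pa.2.1) 26) with
    | none =>
      rw [hinv] at h
      have := ih hrest h
      refine ⟨fun K hK => ?_, this.2⟩
      simp only [innerA, tryPairA]
      rw [mod_inv_eq_inv26 _ (det_bounds _).1 (det_bounds _).2, hinv]
      exact this.1 K hK
    | some di =>
      rw [hinv] at h
      have hmi : mod_inv (PySem.Int.mod (pa.1 * pb.2.1 - pb.1 * pa.2.1) 26) 26 = some di := by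
        rw [mod_inv_eq_inv26 _ (det_bounds _).1 (det_bounds _).2, hinv]
      simp only [mod26_eq] at h
      cases hv : verifyB ((pa.2.2.1 * pb.2.1 - pb.2.2.1 * pa.2.1) * di % 26)
          ((pb.2.2.1 * pa.1 - pa.2.2.1 * pb.1) * di % 26)
          ((pa.2.2.2 * pb.2.1 - pb.2.2.2 * pa.2.1) * di % 26)
          ((pb.2.2.2 * pa.1 - pa.2.2.2 * pb.1) * di % 26) pairs with
      | true =>
        rw [hv] at h
        simp only [reduceIte, Option.some.injEq] at h
        subst h
        refine ⟨fun K hK => ?_, fun hr => nomatch hr⟩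
        injection hK with hK
        simp only [innerA]
        rw [tryPairA_eq pa pb pairs di hmi]
        simp only [hv, reduceIte]
        rw [hK]
      | false =>
        rw [hv] at h
        rw [if_neg (by simp)] at h
        injection h with h
        subst h
        have hall := all_tryPairA_none pa pb pairs di hpa hpb hmi hv
        exact ⟨fun K hK => absurd hK (by simp), fun _ => hall⟩

-- lift to the outer scans
theorem outer_case (l pairs : List (Int × Int × Int × Int)) (hl : ∀ x ∈ l, x ∈ pairs) :
    (match outerB l pairs with
     | some r => r
     | none => none) = outerA l pairs := by
  induction l with
  | nil => rfl
  | cons pa rest ih =>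
    have hpa : pa ∈ pairs := hl pa (by simp)
    have hrest : ∀ x ∈ rest, x ∈ pairs := fun x hx => hl x (by simp [hx])
    simp only [outerB, outerA]
    cases hin : innerB pa rest pairs with
    | none =>
      rw [innerA_of_innerB_none pa rest pairs hin]
      exact ih hrest
    | some r =>
      have := inner_case pa rest pairs r hpa hrest hin
      cases r with
      | some K => rw [this.1 K rfl]
      | none =>
        have hall := this.2 rfl
        rw [innerA_none_of_all pa rest pairs hall, outerA_none_of_all rest pairs hall]

-- ===== VERDICT (by name: the statement is the Claim_ definition above) =====
theorem solve_hill2_spec : Claim_equal_solve_hill2 := by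
  intro pairs _
  unfold Spec_solve_hill2 solve_hill2 solve_hill2_alt
  by_cases hlen : PySem.List.len pairs < 2
  · rw [if_pos hlen, if_pos hlen]
  · rw [if_neg hlen, if_neg hlen]
    exact (outer_case pairs pairs (fun x hx => hx)).symm
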